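-- pv_equiv track=rewrite | github.com/eabrydon/advent_of_code | 2023/day8.py | find_z_to_z_steps
-- ===== SOURCE A (Python) =====
-- def follow_map_to_z(node, dirs, i, mapdict):
--     '''From node and position i in the directions, find how many steps to the
--     next z node
--     Returns steps and node name'''
--     finished = False
--     dirs = ''.join([dirs[i:],dirs[:i]])
--     step_count = 0
--     while not finished:
--         for d in dirs:
--             node = mapdict[node][d]
--             step_count += 1
--             if node[2] == 'Z':
--                 finished = True
--                 break
--             elif step_count >= 10E7:
--                 finished = True
--                 break
--     return (step_count, node)
--
-- def find_z_to_z_steps(mapdict, dirs):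
--     '''Makes a map of the steps counts and destination node for each znode to
--     get to another z node starting at a given point in the sequence
--     Can use this map to avoid moving 1 step at a time'''
--     znodes = [x for x in list(mapdict.keys()) if x[2] == 'Z']
--     step_dists = {}
--     for node in znodes:
--         step_dists[node] = {}
--         for i in range(len(dirs)):
--             step_dists[node][i] = follow_map_to_z(node, dirs, i, mapdict)
--     return step_dists
-- ===== SOURCE B (Python) =====
-- def find_z_to_z_steps(mapdict, dirs):
--     '''Same map as A, built by memoising "steps/node to the next Z" over the
--     functional graph of (node, direction-index) states: each state is solved
--     once, by iterative path-following with back-fill.'''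
--     L = len(dirs)
--     znodes = [x for x in mapdict if x[2] == 'Z']
--     next_z = {}  # (node, dir_index) -> (steps to next Z, that Z node)
--
--     def solve(node, j):
--         if (node, j) in next_z:
--             return next_z[(node, j)]
--         start = (node, j)
--         path = [start]
--         seen = {start}
--         while True:
--             nxt = mapdict[node][dirs[j]]
--             node, j = nxt, (j + 1) % L
--             if nxt[2] == 'Z':
--                 steps, dest = 0, nxt
--                 break
--             if (node, j) in next_z:
--                 steps, dest = next_z[(node, j)]
--                 break
--             if (node, j) in seen:
--                 raise ValueError('no Z node reachable')
--             path.append((node, j))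
--             seen.add((node, j))
--         for s in reversed(path):
--             steps += 1
--             next_z[s] = (steps, dest)
--         return next_z[start]
--
--     return {z: {i: solve(z, i) for i in range(L)} for z in znodes}
-- ===== Notes on version B (the rewrite author's own statement) =====
-- stated objective: alternative
-- what changed: A re-walks the map step by step from scratch for every Z-node and every direction offset; B instead memoises steps-to-next-Z over the functional graph of (node, direction-index) states, solving each state once by iterative path-following with back-fill; where no Z is reachable B raises ValueError instead of A's 10^8-step capped walk (excluded by Pre_).
import Mathlib
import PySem

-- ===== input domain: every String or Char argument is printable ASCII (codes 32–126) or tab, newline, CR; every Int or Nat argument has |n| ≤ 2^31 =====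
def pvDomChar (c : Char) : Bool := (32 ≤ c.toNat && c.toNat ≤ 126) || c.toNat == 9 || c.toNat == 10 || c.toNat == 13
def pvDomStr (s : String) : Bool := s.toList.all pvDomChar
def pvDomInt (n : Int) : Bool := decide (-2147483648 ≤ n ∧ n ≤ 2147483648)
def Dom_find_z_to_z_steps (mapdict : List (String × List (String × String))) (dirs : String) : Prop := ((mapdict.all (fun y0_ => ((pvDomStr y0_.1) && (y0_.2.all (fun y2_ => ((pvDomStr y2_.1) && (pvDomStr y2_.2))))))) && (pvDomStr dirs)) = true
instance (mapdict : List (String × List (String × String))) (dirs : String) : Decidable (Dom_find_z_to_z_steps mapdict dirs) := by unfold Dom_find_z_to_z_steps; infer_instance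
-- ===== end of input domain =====

-- B builds the same Z-to-Z map by memoising next-Z over (node, direction-index) states,
-- solving each state once by path-following with back-fill, instead of A's re-walk of the map
-- per Z-node and offset (objective: alternative algorithm).


-- ===== PORT A =====
-- shared with port B: the input dict-of-dicts as PySem.Dict values (boundary conversion)
def pvConv (mapdict : List (String × List (String × String))) :
    PySem.Dict String (PySem.Dict String String) :=
  PySem.Dict.ofList (mapdict.map (fun p => (p.1, PySem.Dict.ofList p.2)))

-- mapdict[node][d]; total form: on KeyError (excluded by Pre_) returns `node`
def pvLookup (md : PySem.Dict String (PySem.Dict String String)) (node : String) (d : Char) : String :=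
  (((md.get? node).bind (fun inner => inner.get? (String.singleton d))).getD node)

-- node[2] == 'Z'; total form: False where Python raises IndexError (excluded by Pre_)
def pvIsZ (node : String) : Bool := PySem.Str.pyGet? node 2 == some 'Z'

-- the `for d in dirs:` body of follow_map_to_z; returns (finished, node, step_count)
def pvForA (md : PySem.Dict String (PySem.Dict String String)) :
    List Char → String → Int → Bool × String × Int
  | [], node, count => (false, node, count)
  | d :: rest, node, count =>
    let node' := pvLookup md node d
    let count' := count + 1
    if pvIsZ node' then (true, node', count')
    else if count' ≥ 100000000 then (true, node', count')
    else pvForA md rest node' count'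

-- the `while not finished:` loop; fuel 10^8+1 outer passes is enough on every input Pre_
-- admits (step_count grows every pass of the nonempty rotated string, capped at 10^8)
def pvWhileA (md : PySem.Dict String (PySem.Dict String String)) (drot : List Char) :
    Nat → String → Int → Int × String
  | 0, node, count => (count, node)
  | fuel + 1, node, count =>
    match pvForA md drot node count with
    | (true, node', count') => (count', node')
    | (false, node', count') => pvWhileA md drot fuel node' count'

def follow_map_to_z (node : String) (dirs : String) (i : Int)
    (md : PySem.Dict String (PySem.Dict String String)) : Int × String :=
  let dirs2 := PySem.Str.join "" [PySem.Str.slice dirs (some i) none, PySem.Str.slice dirs none (some i)]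
  pvWhileA md dirs2.toList 100000001 node 0

def find_z_to_z_steps (mapdict : List (String × List (String × String))) (dirs : String) :
    List (String × List (Int × Int × String)) :=
  let md := pvConv mapdict
  let znodes := md.keys.filter (fun x => pvIsZ x)
  let step_dists := znodes.foldl
    (fun d node =>
      let d := d.insert node PySem.Dict.empty
      (PySem.List.pyRange 0 (PySem.Str.len dirs) 1).foldl
        (fun d i => d.modify node PySem.Dict.empty
          (fun inner => inner.insert i (follow_map_to_z node dirs i md))) d)
    PySem.Dict.empty
  step_dists.items.map (fun p => (p.1, p.2.items))

-- ===== PORT B =====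
-- the `while True:` path-following loop of B's solve; returns (steps, dest, path) as at the
-- Python break. The Nat fuel is Lean-only totality scaffolding (the Python loop is unbounded);
-- the fuel-exhausted and seen-revisit (Python: raise ValueError) branches return a dummy and
-- are unreachable under Pre_.
def pvBLoop (md : PySem.Dict String (PySem.Dict String String)) (dl : List Char) (L : Int)
    (memo : PySem.Dict (String × Int) (Int × String)) :
    Nat → String → Int → List (String × Int) → PySem.Set (String × Int) →
    Int × String × List (String × Int)
  | 0, node, _, path, _ => (0, node, path)
  | fuel + 1, node, j, path, seen =>
    let nxt := pvLookup md node (PySem.List.pyGetD dl j ' ')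
    let j' := PySem.Int.mod (j + 1) L
    if pvIsZ nxt then (0, nxt, path)
    else
      match memo.get? (nxt, j') with
      | some r => (r.1, r.2, path)
      | none =>
        if PySem.Set.contains seen (nxt, j') then (0, nxt, path)
        else pvBLoop md dl L memo fuel nxt j' (path ++ [(nxt, j')]) (PySem.Set.add seen (nxt, j'))

def pvSolve (md : PySem.Dict String (PySem.Dict String String)) (dl : List Char) (L : Int)
    (memo : PySem.Dict (String × Int) (Int × String)) (node : String) (j : Int) :
    PySem.Dict (String × Int) (Int × String) × (Int × String) :=
  match memo.get? (node, j) with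
  | some r => (memo, r)
  | none =>
    let start := (node, j)
    match pvBLoop md dl L memo 100000001 node j [start] (PySem.Set.add PySem.Set.empty start) with
    | (steps, dest, path) =>
      let res := path.reverse.foldl
        (fun (acc : Int × PySem.Dict (String × Int) (Int × String)) s =>
          (acc.1 + 1, acc.2.insert s (acc.1 + 1, dest))) (steps, memo)
      (res.2, res.2.getD start (0, node))

def find_z_to_z_steps_alt (mapdict : List (String × List (String × String))) (dirs : String) :
    List (String × List (Int × Int × String)) :=
  let md := pvConv mapdict
  let dl := dirs.toList
  let L := PySem.Str.len dirs
  let znodes := md.keys.filter (fun x => pvIsZ x)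
  (znodes.foldl
    (fun (acc : PySem.Dict (String × Int) (Int × String) × List (String × List (Int × Int × String))) z =>
      let inner := (PySem.List.pyRange 0 L 1).foldl
        (fun (a : PySem.Dict (String × Int) (Int × String) × List (Int × Int × String)) i =>
          match pvSolve md dl L a.1 z i with
          | (m', r) => (m', a.2 ++ [(i, r)]))
        (acc.1, [])
      (inner.1, acc.2 ++ [(z, inner.2)]))
    (PySem.Dict.empty, [])).2

-- ===== PRECONDITION & SPEC =====
-- one step of the walk from node u at direction index j; none exactly where the Python walk
-- raises (KeyError on a missing node/direction, IndexError on a target shorter than 3)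
def pvStep? (md : PySem.Dict String (PySem.Dict String String)) (dl : List Char)
    (u : String) (j : Nat) : Option String :=
  match md.get? u with
  | none => none
  | some inner =>
    match inner.get? (String.singleton (dl.getD (j % dl.length) ' ')) with
    | none => none
    | some v => if 3 ≤ v.toList.length then some v else none

-- first Z-node hit within `fuel` steps: some (steps, znode), walking dl cyclically
def pvWalk (md : PySem.Dict String (PySem.Dict String String)) (dl : List Char) :
    Nat → String → Nat → Option (Nat × String)
  | 0, _, _ => none
  | fuel + 1, u, j =>
    match pvStep? md dl u j with
    | none => none
    | some v =>
      if v.toList.getD 2 ' ' = 'Z' then some (1, v)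
      else (pvWalk md dl fuel v (j + 1)).map (fun r => (r.1 + 1, r.2))

-- Pre_ excludes: inputs with a key shorter than 3 chars (A raises IndexError there); and
-- inputs on which some queried walk (a Z-keyed node with some direction offset) crashes
-- (KeyError/IndexError) or fails to reach a Z node within A's 10^8-step cap — in the latter
-- case A returns its cap sentinel after 10^8 steps while B raises ValueError.
-- "Every queried start reaches a Z node" is reachability in the input's functional graph; it
-- has no shape-only characterisation, so it is stated through pvWalk, the tiny reference walk
-- of the SPEC (not either port's loop: A rotates the string and runs a capped nested loop,
-- B memoises over states); the fuel min(|mapdict|·|dirs|, 10^8) is exact: a walk that reaches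
-- a Z at all does so within #states steps, and beyond 10^8 steps A's cap fires first.
def Pre_find_z_to_z_steps (mapdict : List (String × List (String × String))) (dirs : String) : Prop :=
  (∀ p ∈ mapdict, 3 ≤ p.1.toList.length) ∧
  (∀ p ∈ mapdict, p.1.toList.getD 2 ' ' = 'Z' →
    ∀ i < dirs.toList.length,
      (pvWalk (pvConv mapdict) dirs.toList
        (min (mapdict.length * dirs.toList.length) 100000000) p.1 i).isSome = true)

instance (mapdict : List (String × List (String × String))) (dirs : String) :
    Decidable (Pre_find_z_to_z_steps mapdict dirs) := by
  unfold Pre_find_z_to_z_steps; infer_instance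

def pvWitness_find_z_to_z_steps : (List (String × List (String × String))) × String :=
  ([("AAZ", [("L", "AAZ")])], "L")

def Spec_find_z_to_z_steps (mapdict : List (String × List (String × String))) (dirs : String)
    (out : List (String × List (Int × Int × String))) : Prop :=
  out = find_z_to_z_steps_alt mapdict dirs

instance (mapdict : List (String × List (String × String))) (dirs : String)
    (out : List (String × List (Int × Int × String))) :
    Decidable (Spec_find_z_to_z_steps mapdict dirs out) := by
  unfold Spec_find_z_to_z_steps; infer_instance

-- ===== CLAIM (what is proved, stated in full; the proofs are below) =====
def Claim_equal_find_z_to_z_steps : Prop := ∀ (mapdict : List (String × List (String × String))) (dirs : String), Dom_find_z_to_z_steps mapdict dirs → Pre_find_z_to_z_steps mapdict dirs → Spec_find_z_to_z_steps mapdict dirs (find_z_to_z_steps mapdict dirs)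

-- ===== LEMMAS AND PROOFS =====

-- ---------- basic facts about the specification walk pvWalk ----------

lemma pvWalk_succ_z (md : PySem.Dict String (PySem.Dict String String)) (dl : List Char)
    (f : Nat) (u v : String) (j : Nat) (hs : pvStep? md dl u j = some v)
    (hz : v.toList.getD 2 ' ' = 'Z') : pvWalk md dl (f + 1) u j = some (1, v) := by
  simp only [pvWalk, hs, if_pos hz]

lemma pvWalk_succ_nz (md : PySem.Dict String (PySem.Dict String String)) (dl : List Char)
    (f : Nat) (u v : String) (j : Nat) (hs : pvStep? md dl u j = some v)
    (hz : ¬ v.toList.getD 2 ' ' = 'Z') :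
    pvWalk md dl (f + 1) u j = (pvWalk md dl f v (j + 1)).map (fun r => (r.1 + 1, r.2)) := by
  simp only [pvWalk, hs, if_neg hz]

lemma pvWalk_succ_step (md : PySem.Dict String (PySem.Dict String String)) (dl : List Char)
    (f : Nat) (u v : String) (j k : Nat) (z : String) (hs : pvStep? md dl u j = some v)
    (hz : ¬ v.toList.getD 2 ' ' = 'Z') (hw : pvWalk md dl f v (j + 1) = some (k, z)) :
    pvWalk md dl (f + 1) u j = some (k + 1, z) := by
  simp only [pvWalk, hs, if_neg hz, hw, Option.map_some]

lemma pvWalk_pos (md : PySem.Dict String (PySem.Dict String String)) (dl : List Char)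
    (f : Nat) (u : String) (j k : Nat) (z : String)
    (h : pvWalk md dl f u j = some (k, z)) : 1 ≤ k := by
  cases f with
  | zero => simp [pvWalk] at h
  | succ f =>
    simp only [pvWalk] at h
    cases hs : pvStep? md dl u j with
    | none => simp [hs] at h
    | some v =>
      simp only [hs] at h
      by_cases hz : v.toList.getD 2 ' ' = 'Z'
      · rw [if_pos hz] at h
        injection h with h
        have : (1 : Nat) = k := (Prod.mk.injEq _ _ _ _ ▸ h).1
        omega
      · rw [if_neg hz, Option.map_eq_some_iff] at h
        obtain ⟨⟨a, b⟩, _, hab⟩ := h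
        have : a + 1 = k := (Prod.mk.injEq _ _ _ _ ▸ hab).1
        omega

lemma pvWalk_succ_elim (md : PySem.Dict String (PySem.Dict String String)) (dl : List Char)
    (f : Nat) (u : String) (j k : Nat) (z : String)
    (h : pvWalk md dl (f + 1) u j = some (k, z)) :
    ∃ v, pvStep? md dl u j = some v ∧
      ((v.toList.getD 2 ' ' = 'Z' ∧ k = 1 ∧ z = v) ∨
       (¬ v.toList.getD 2 ' ' = 'Z' ∧ 2 ≤ k ∧ pvWalk md dl f v (j + 1) = some (k - 1, z))) := by
  simp only [pvWalk] at h
  cases hs : pvStep? md dl u j with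
  | none => simp [hs] at h
  | some v =>
    refine ⟨v, rfl, ?_⟩
    simp only [hs] at h
    by_cases hz : v.toList.getD 2 ' ' = 'Z'
    · rw [if_pos hz] at h
      injection h with h
      exact Or.inl ⟨hz, (Prod.mk.injEq _ _ _ _ ▸ h).1.symm, (Prod.mk.injEq _ _ _ _ ▸ h).2.symm⟩
    · rw [if_neg hz, Option.map_eq_some_iff] at h
      obtain ⟨⟨a, b⟩, hw, hab⟩ := h
      have h1 : a + 1 = k := (Prod.mk.injEq _ _ _ _ ▸ hab).1
      have h2 : b = z := (Prod.mk.injEq _ _ _ _ ▸ hab).2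
      have hpos := pvWalk_pos md dl f v (j + 1) a b hw
      refine Or.inr ⟨hz, by omega, ?_⟩
      have hk1 : k - 1 = a := by omega
      rw [hk1, ← h2]
      exact hw

lemma pvWalk_le (md : PySem.Dict String (PySem.Dict String String)) (dl : List Char) :
    ∀ (f : Nat) (u : String) (j k : Nat) (z : String),
      pvWalk md dl f u j = some (k, z) → k ≤ f := by
  intro f
  induction f with
  | zero => intro u j k z h; simp [pvWalk] at h
  | succ f ih =>
    intro u j k z h
    obtain ⟨v, _, h⟩ := pvWalk_succ_elim md dl f u j k z h
    rcases h with ⟨_, hk, _⟩ | ⟨_, hk, hw⟩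
    · omega
    · have := ih v (j + 1) (k - 1) z hw; omega

lemma pvWalk_mono (md : PySem.Dict String (PySem.Dict String String)) (dl : List Char) :
    ∀ (f f' : Nat), f ≤ f' → ∀ (u : String) (j k : Nat) (z : String),
      pvWalk md dl f u j = some (k, z) → pvWalk md dl f' u j = some (k, z) := by
  intro f
  induction f with
  | zero => intro f' _ u j k z h; simp [pvWalk] at h
  | succ f ih =>
    intro f' hf u j k z h
    obtain ⟨f'', rfl⟩ : ∃ f'', f' = f'' + 1 := ⟨f' - 1, by omega⟩
    obtain ⟨v, hs, h⟩ := pvWalk_succ_elim md dl f u j k z h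
    rcases h with ⟨hz, hk, hzv⟩ | ⟨hz, hk, hw⟩
    · rw [hk, hzv]; exact pvWalk_succ_z md dl f'' u v j hs hz
    · have h1 := ih f'' (by omega) v (j + 1) (k - 1) z hw
      have h2 := pvWalk_succ_step md dl f'' u v j (k - 1) z hs hz h1
      rw [show k - 1 + 1 = k by omega] at h2
      exact h2

lemma pvWalk_exact (md : PySem.Dict String (PySem.Dict String String)) (dl : List Char) :
    ∀ (f : Nat) (u : String) (j k : Nat) (z : String),
      pvWalk md dl f u j = some (k, z) → pvWalk md dl k u j = some (k, z) := by
  intro f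
  induction f with
  | zero => intro u j k z h; simp [pvWalk] at h
  | succ f ih =>
    intro u j k z h
    obtain ⟨v, hs, h⟩ := pvWalk_succ_elim md dl f u j k z h
    rcases h with ⟨hz, hk, hzv⟩ | ⟨hz, hk, hw⟩
    · rw [hk, hzv]; exact pvWalk_succ_z md dl 0 u v j hs hz
    · have h1 := ih v (j + 1) (k - 1) z hw
      have h2 := pvWalk_succ_step md dl (k - 1) u v j (k - 1) z hs hz h1
      rw [show k - 1 + 1 = k by omega] at h2
      exact h2

lemma pvWalk_unique (md : PySem.Dict String (PySem.Dict String String)) (dl : List Char)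
    (f f' : Nat) (u : String) (j k k' : Nat) (z z' : String)
    (h : pvWalk md dl f u j = some (k, z)) (h' : pvWalk md dl f' u j = some (k', z')) :
    k = k' ∧ z = z' := by
  have h1 := pvWalk_exact md dl f u j k z h
  have h2 := pvWalk_exact md dl f' u j k' z' h'
  rcases le_total k k' with hle | hle
  · have h3 := pvWalk_mono md dl k k' hle u j k z h1
    rw [h3] at h2
    injection h2 with h2
    exact ⟨(Prod.mk.injEq _ _ _ _ ▸ h2).1, (Prod.mk.injEq _ _ _ _ ▸ h2).2⟩
  · have h3 := pvWalk_mono md dl k' k hle u j k' z' h2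
    rw [h3] at h1
    injection h1 with h1
    exact ⟨(Prod.mk.injEq _ _ _ _ ▸ h1).1.symm, (Prod.mk.injEq _ _ _ _ ▸ h1).2.symm⟩

lemma pvWalk_congr_mod (md : PySem.Dict String (PySem.Dict String String)) (dl : List Char) :
    ∀ (f : Nat) (u : String) (j j' : Nat), j % dl.length = j' % dl.length →
      pvWalk md dl f u j = pvWalk md dl f u j' := by
  intro f
  induction f with
  | zero => intro u j j' _; rfl
  | succ f ih =>
    intro u j j' hmod
    have hstep : pvStep? md dl u j = pvStep? md dl u j' := by
      simp only [pvStep?, hmod]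
    have hnext : (j + 1) % dl.length = (j' + 1) % dl.length := by
      rw [Nat.add_mod j 1, hmod, ← Nat.add_mod]
    cases hv : pvStep? md dl u j' with
    | none => simp only [pvWalk, hstep, hv]
    | some v =>
      by_cases hz : v.toList.getD 2 ' ' = 'Z'
      · rw [pvWalk_succ_z md dl f u v j (hstep.trans hv) hz,
          pvWalk_succ_z md dl f u v j' hv hz]
      · rw [pvWalk_succ_nz md dl f u v j (hstep.trans hv) hz,
          pvWalk_succ_nz md dl f u v j' hv hz, ih v (j + 1) (j' + 1) hnext]

-- ---------- bridges between the ports' primitives and the walk ----------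

lemma pvStep?_elim (md : PySem.Dict String (PySem.Dict String String)) (dl : List Char)
    (u : String) (j : Nat) (v : String) (h : pvStep? md dl u j = some v) :
    pvLookup md u (dl.getD (j % dl.length) ' ') = v ∧ 3 ≤ v.toList.length := by
  unfold pvStep? at h
  split at h
  · simp at h
  · rename_i inner h1
    split at h
    · simp at h
    · rename_i w h2
      split_ifs at h with h3
      · injection h with h; subst h
        refine ⟨?_, h3⟩
        simp only [pvLookup, h1, Option.bind_some]
        rw [h2, Option.getD_some]

lemma pvIsZ_eq (v : String) (h : 3 ≤ v.toList.length) :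
    pvIsZ v = decide (v.toList.getD 2 ' ' = 'Z') := by
  have h2 : (2 : Nat) < v.toList.length := by omega
  unfold pvIsZ
  simp only [PySem.Str.pyGet?, PySem.Chars.pyGet?_eq_listPyGet?]
  rw [show (PySem.List.pyGet? v.toList 2) = PySem.List.pyGet? v.toList ((2 : Nat) : Int) from rfl,
    PySem.List.pyGet?_ofNat _ _ h2]
  rw [List.getD_eq_getElem?_getD, List.getElem?_eq_getElem h2, Option.getD_some]
  show (some v.toList[2] == some 'Z') = _
  rw [show (some v.toList[2] == some 'Z') = (v.toList[2] == 'Z') by cases hbe : (v.toList[2] == 'Z') <;> simp_all]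
  exact Bool.beq_eq_decide_eq _ _

-- ---------- A side: the rotated nested loop computes the walk ----------

lemma pvRot_getD (dl : List Char) (i p : Nat) (hi : i < dl.length) (c : Char) :
    (dl.drop i ++ dl.take i).getD (p % dl.length) c = dl.getD ((i + p) % dl.length) c := by
  have hL : 0 < dl.length := by omega
  have hq : p % dl.length < dl.length := Nat.mod_lt _ hL
  have hmod : (i + p) % dl.length = (i + p % dl.length) % dl.length := by
    rw [Nat.add_mod i p, Nat.add_mod i (p % dl.length), Nat.mod_mod]
  rcases Nat.lt_or_ge (p % dl.length) (dl.length - i) with hc | hc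
  · rw [List.getD_eq_getElem?_getD, List.getD_eq_getElem?_getD,
      List.getElem?_append_left (by simp [List.length_drop]; omega),
      List.getElem?_drop, hmod,
      Nat.mod_eq_of_lt (show i + p % dl.length < dl.length by omega)]
  · rw [List.getD_eq_getElem?_getD, List.getD_eq_getElem?_getD,
      List.getElem?_append_right (by simp [List.length_drop]; omega)]
    have h1 : (i + p % dl.length) % dl.length = i + p % dl.length - dl.length := by
      rw [Nat.mod_eq_sub_mod (by omega), Nat.mod_eq_of_lt (by omega)]
    have h2 : p % dl.length - (dl.drop i).length = i + p % dl.length - dl.length := by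
      simp only [List.length_drop]; omega
    have h3 : i + p % dl.length - dl.length < i := by omega
    rw [hmod, h1, h2, List.getElem?_take_of_lt h3]

lemma pvStep?_rot (md : PySem.Dict String (PySem.Dict String String)) (dl : List Char)
    (i : Nat) (hi : i < dl.length) (u : String) (p : Nat) :
    pvStep? md (dl.drop i ++ dl.take i) u p = pvStep? md dl u (i + p) := by
  have hlen : (dl.drop i ++ dl.take i).length = dl.length := by
    simp only [List.length_append, List.length_drop, List.length_take]; omega
  simp only [pvStep?, hlen, pvRot_getD dl i p hi]

lemma pvWalk_rot (md : PySem.Dict String (PySem.Dict String String)) (dl : List Char)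
    (i : Nat) (hi : i < dl.length) :
    ∀ (f : Nat) (u : String) (p : Nat),
      pvWalk md (dl.drop i ++ dl.take i) f u p = pvWalk md dl f u (i + p) := by
  intro f
  induction f with
  | zero => intro u p; rfl
  | succ f ih =>
    intro u p
    cases hv : pvStep? md dl u (i + p) with
    | none => simp only [pvWalk, pvStep?_rot md dl i hi u p, hv]
    | some v =>
      have hs : pvStep? md (dl.drop i ++ dl.take i) u p = some v := by
        rw [pvStep?_rot md dl i hi u p]; exact hv
      by_cases hz : v.toList.getD 2 ' ' = 'Z'
      · rw [pvWalk_succ_z md (dl.drop i ++ dl.take i) f u v p hs hz,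
          pvWalk_succ_z md dl f u v (i + p) hv hz]
      · rw [pvWalk_succ_nz md (dl.drop i ++ dl.take i) f u v p hs hz,
          pvWalk_succ_nz md dl f u v (i + p) hv hz, ih v (p + 1),
          show i + (p + 1) = i + p + 1 from by omega]

lemma pvForA_eq (md : PySem.Dict String (PySem.Dict String String)) (r : List Char)
    (z : String) :
    ∀ (chars : List Char) (u : String) (q k : Nat),
      chars = r.drop (q % r.length) →
      pvWalk md r k u q = some (k, z) →
      q + k ≤ 100000000 →
      (k ≤ chars.length ∧ pvForA md chars u (q : Int) = (true, z, ((q + k : Nat) : Int)))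
      ∨ (chars.length < k ∧ ∃ u', pvForA md chars u (q : Int) = (false, u', ((q + chars.length : Nat) : Int))
          ∧ pvWalk md r (k - chars.length) u' (q + chars.length) = some (k - chars.length, z)) := by
  intro chars
  induction chars with
  | nil =>
    intro u q k _ hw _
    have hk1 := pvWalk_pos md r k u q k z hw
    refine Or.inr ⟨by simpa using hk1, u, by simp [pvForA], ?_⟩
    simpa using hw
  | cons d rest ih =>
    intro u q k hchars hw hcap
    have hL : 0 < r.length := by
      by_contra h0
      have hr0 : r = [] := by cases r <;> simp_all
      rw [hr0] at hchars; simp at hchars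
    have hq : q % r.length < r.length := Nat.mod_lt _ hL
    have hget : r[q % r.length]? = some d := by
      have h1 : (r.drop (q % r.length))[(0 : Nat)]? = r[q % r.length + 0]? := List.getElem?_drop
      rw [← hchars] at h1
      simpa using h1.symm
    have hd : r.getD (q % r.length) ' ' = d := by
      rw [List.getD_eq_getElem?_getD, hget]; rfl
    have hrest : rest = r.drop (q % r.length + 1) := by
      rw [← List.tail_drop, ← hchars]; rfl
    obtain ⟨k0, rfl⟩ : ∃ k0, k = k0 + 1 :=
      ⟨k - 1, by have := pvWalk_pos md r k u q k z hw; omega⟩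
    obtain ⟨v, hs, hcases⟩ := pvWalk_succ_elim md r k0 u q (k0 + 1) z hw
    obtain ⟨hlk, hlen3⟩ := pvStep?_elim md r u q v hs
    rw [hd] at hlk
    rcases hcases with ⟨hz, hk1, hzv⟩ | ⟨hz, _, hw'⟩
    · -- Z after one step: k = 1
      left
      have hk : k0 = 0 := by omega
      subst hk
      refine ⟨by simp, ?_⟩
      simp only [pvForA, hlk, pvIsZ_eq v hlen3, hz, decide_true, if_true]
      rw [← hzv]
      have : ((q : Int) + 1) = ((q + 1 : Nat) : Int) := by push_cast; ring
      rw [this]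
    · -- not Z yet: the loop continues
      have hk0pos : 1 ≤ k0 := by omega
      have hwexact : pvWalk md r k0 v (q + 1) = some (k0, z) := by simpa using hw'
      have hzb : pvIsZ v = false := by
        rw [pvIsZ_eq v hlen3]; simp only [decide_eq_false_iff_not]; exact hz
      have hne : ¬ ((q : Int) + 1 ≥ 100000000) := by omega
      have hstep1 : pvForA md (d :: rest) u (q : Int) = pvForA md rest v (((q + 1 : Nat)) : Int) := by
        simp only [pvForA, hlk, hzb, Bool.false_eq_true, if_false]
        rw [if_neg hne, show ((q : Int) + 1) = (((q + 1 : Nat)) : Int) by push_cast; ring]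
      rcases eq_or_ne rest [] with hrnil | hrne
      · -- the pass ends exactly here; the while loop will restart with a fresh pass
        subst hrnil
        right
        refine ⟨by simp; omega, v, ?_, ?_⟩
        · rw [hstep1]; simp [pvForA]
        · simpa using hwexact
      · -- the pass continues inside chars
        have hq1 : q % r.length + 1 < r.length := by
          by_contra hge
          exact hrne (by rw [hrest]; exact List.drop_eq_nil_iff.mpr (by omega))
        have hmod1 : (q + 1) % r.length = q % r.length + 1 := by
          conv_lhs => rw [Nat.add_mod]
          rw [Nat.mod_eq_of_lt (show 1 < r.length by omega)]
          exact Nat.mod_eq_of_lt (by omega)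
        have hrest1 : rest = r.drop ((q + 1) % r.length) := by rw [hmod1]; exact hrest
        rcases ih v (q + 1) k0 hrest1 hwexact (by omega) with ⟨hle, heq⟩ | ⟨hlt, u', heq, hwrem⟩
        · left
          refine ⟨by simp; omega, ?_⟩
          rw [hstep1, heq]
          simp only [Prod.mk.injEq]
          refine ⟨trivial, trivial, by push_cast; ring⟩
        · right
          refine ⟨by simp; omega, u', ?_, ?_⟩
          · rw [hstep1, heq]
            simp only [Prod.mk.injEq]
            refine ⟨trivial, trivial, by simp only [List.length_cons]; push_cast; ring⟩
          · have h1 : k0 - rest.length = k0 + 1 - (d :: rest).length := by simp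
            have h2 : q + 1 + rest.length = q + (d :: rest).length := by simp; omega
            rw [h1, h2] at hwrem
            exact hwrem
lemma pvWhileA_eq (md : PySem.Dict String (PySem.Dict String String)) (r : List Char)
    (z : String) :
    ∀ (fw : Nat) (u : String) (q k : Nat),
      q % r.length = 0 →
      pvWalk md r k u q = some (k, z) →
      q + k ≤ 100000000 →
      k ≤ fw * r.length →
      pvWhileA md r fw u (q : Int) = (((q + k : Nat) : Int), z) := by
  intro fw
  induction fw with
  | zero =>
    intro u q k _ hw _ hk
    exact absurd (pvWalk_pos md r k u q k z hw) (by simp at hk; omega)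
  | succ fw ih =>
    intro u q k hq hw hcap hk
    have hchars : r = r.drop (q % r.length) := by rw [hq]; rfl
    rcases pvForA_eq md r z r u q k hchars hw hcap with ⟨_, heq⟩ | ⟨hlt, u', heq, hwrem⟩
    · simp only [pvWhileA, heq]
    · have hL : 0 < r.length := by
        rcases Nat.eq_zero_or_pos r.length with h0 | h0
        · rw [h0] at hk hlt; simp at hk; omega
        · exact h0
      have hq' : (q + r.length) % r.length = 0 := by
        rw [Nat.add_mod, hq, Nat.mod_self]; simp
      have hrec := ih u' (q + r.length) (k - r.length) hq' hwrem (by omega) (by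
        have hmul : (fw + 1) * r.length = fw * r.length + r.length := by ring
        omega)
      rw [show q + r.length + (k - r.length) = q + k from by omega] at hrec
      simp only [pvWhileA, heq]
      exact hrec

lemma pvFollow_eq (md : PySem.Dict String (PySem.Dict String String)) (dirs : String)
    (u : String) (iN : Nat) (hi : iN < dirs.toList.length) (k : Nat) (z : String)
    (hw : pvWalk md dirs.toList k u iN = some (k, z)) (hcap : k ≤ 100000000) :
    follow_map_to_z u dirs ((iN : Nat) : Int) md = (((k : Nat) : Int), z) := by
  simp only [follow_map_to_z]
  have hrot : (PySem.Str.join "" [PySem.Str.slice dirs (some ((iN : Nat) : Int)) none,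
      PySem.Str.slice dirs none (some ((iN : Nat) : Int))]).toList
      = dirs.toList.drop iN ++ dirs.toList.take iN := by
    simp [PySem.Str.join, PySem.Str.slice, PySem.Chars.join_cons_cons,
      PySem.Chars.join_singleton, String.toList_ofList, PySem.Chars.slice_eq_listSlice,
      PySem.List.slice_from_natCast, PySem.List.slice_to_natCast]
  rw [hrot]
  have hwr : pvWalk md (dirs.toList.drop iN ++ dirs.toList.take iN) k u 0 = some (k, z) := by
    rw [pvWalk_rot md dirs.toList iN hi k u 0]
    simpa using hw
  have hlen : (dirs.toList.drop iN ++ dirs.toList.take iN).length = dirs.toList.length := by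
    simp only [List.length_append, List.length_drop, List.length_take]; omega
  have hfin := pvWhileA_eq md (dirs.toList.drop iN ++ dirs.toList.take iN) z 100000001 u 0 k
    (by simp) hwr (by omega) (by
      have h1 : 1 ≤ (dirs.toList.drop iN ++ dirs.toList.take iN).length := by omega
      calc k ≤ 100000001 := by omega
        _ = 100000001 * 1 := by ring
        _ ≤ 100000001 * (dirs.toList.drop iN ++ dirs.toList.take iN).length :=
            Nat.mul_le_mul_left _ h1)
  simpa using hfin

-- ---------- A side: assembling the output dictionary ----------

lemma pvModify_insert {κ ν : Type} [BEq κ] [LawfulBEq κ] (d : PySem.Dict κ ν) (k : κ)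
    (w e : ν) (f : ν → ν) : (d.insert k w).modify k e f = d.insert k (f w) := by
  unfold PySem.Dict.modify
  rw [PySem.Dict.getD_insert_self, PySem.Dict.insert_insert_self]

lemma pvFold_modify_insert {κ ν β : Type} [BEq κ] [LawfulBEq κ] (node : κ) (e : ν)
    (g : β → ν → ν) :
    ∀ (l : List β) (d : PySem.Dict κ ν) (X : ν),
      l.foldl (fun d i => d.modify node e (g i)) (d.insert node X)
        = d.insert node (l.foldl (fun X i => g i X) X) := by
  intro l
  induction l with
  | nil => intro d X; rfl
  | cons i rest ih =>
    intro d X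
    simp only [List.foldl_cons, pvModify_insert]
    exact ih d (g i X)

lemma pvA_canonical (mapdict : List (String × List (String × String))) (dirs : String) :
    find_z_to_z_steps mapdict dirs
      = ((pvConv mapdict).keys.filter (fun x => pvIsZ x)).map
          (fun zn => (zn, (PySem.List.pyRange 0 (PySem.Str.len dirs) 1).map
            (fun i => (i, follow_map_to_z zn dirs i (pvConv mapdict))))) := by
  have hnodup : ((pvConv mapdict).keys.filter (fun x => pvIsZ x)).Nodup :=
    (PySem.Dict.nodup_keys_ofList _).filter _
  simp only [find_z_to_z_steps]
  have hbody : (fun (d : PySem.Dict String (PySem.Dict Int (Int × String))) node =>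
      (PySem.List.pyRange 0 (PySem.Str.len dirs) 1).foldl
        (fun d i => d.modify node PySem.Dict.empty
          (fun inner => inner.insert i (follow_map_to_z node dirs i (pvConv mapdict))))
        (d.insert node PySem.Dict.empty))
      = (fun d node => d.insert node ((PySem.List.pyRange 0 (PySem.Str.len dirs) 1).foldl
          (fun X i => X.insert i (follow_map_to_z node dirs i (pvConv mapdict)))
          PySem.Dict.empty)) := by
    funext d node
    exact pvFold_modify_insert node PySem.Dict.empty _ _ d PySem.Dict.empty
  rw [hbody]
  rw [PySem.Dict.items_foldl_insert_fresh _ (fun a => a) _ PySem.Dict.empty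
    (by intro a _; exact PySem.Dict.contains_empty _)
    (by simpa using hnodup)]
  rw [show (PySem.Dict.empty : PySem.Dict String (PySem.Dict Int (Int × String))).items = []
    from rfl]
  rw [List.nil_append, List.map_map]
  apply List.map_congr_left
  intro zn _
  simp only [Function.comp_apply]
  rw [PySem.Dict.items_foldl_insert_fresh _ (fun i => i) _ PySem.Dict.empty
    (by intro a _; exact PySem.Dict.contains_empty _)
    (by simpa using PySem.List.nodup_pyRange_one 0 (PySem.Str.len dirs))]
  rw [show (PySem.Dict.empty : PySem.Dict Int (Int × String)).items = [] from rfl]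
  rw [List.nil_append]

-- ---------- B side: the memoised path-following loop computes the same walk ----------

-- every memo entry is a true "steps to next Z" fact
def pvInv (md : PySem.Dict String (PySem.Dict String String)) (dl : List Char)
    (memo : PySem.Dict (String × Int) (Int × String)) : Prop :=
  ∀ (u : String) (jI kI : Int) (zz : String), memo.get? (u, jI) = some (kI, zz) →
    ∃ (j k : Nat), jI = (j : Int) ∧ j < dl.length ∧ kI = (k : Int) ∧
      pvWalk md dl k u j = some (k, zz)

lemma pvInv_empty (md : PySem.Dict String (PySem.Dict String String)) (dl : List Char) :
    pvInv md dl PySem.Dict.empty := by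
  intro u jI kI zz h
  rw [PySem.Dict.get?_empty] at h
  exact absurd h (by simp)

-- the states accumulated on B's path, with strictly decreasing distances to the next Z
def pvChain (md : PySem.Dict String (PySem.Dict String String)) (dl : List Char)
    (z : String) : List (String × Int) → Nat → Prop
  | [], _ => True
  | (v, jI) :: t, m =>
    (∃ jv : Nat, jI = (jv : Int) ∧ jv < dl.length ∧ pvWalk md dl m v jv = some (m, z)) ∧
      pvChain md dl z t (m - 1)

lemma pvBLoop_eq (md : PySem.Dict String (PySem.Dict String String)) (dl : List Char)
    (z : String) :
    ∀ (fuel : Nat) (u : String) (j k : Nat) (path : List (String × Int))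
      (seen : PySem.Set (String × Int)) (memo : PySem.Dict (String × Int) (Int × String)),
      pvInv md dl memo →
      j < dl.length →
      pvWalk md dl k u j = some (k, z) →
      k ≤ fuel →
      (∀ (v : String) (jI : Int), (v, jI) ∈ seen →
        ∃ (jv kv : Nat), jI = (jv : Int) ∧ pvWalk md dl kv v jv = some (kv, z) ∧ k ≤ kv) →
      ∃ ext : List (String × Int),
        pvBLoop md dl (dl.length : Int) memo fuel u (j : Int) path seen
          = (((k - 1 - ext.length : Nat) : Int), z, path ++ ext)
        ∧ ext.length + 1 ≤ k ∧ pvChain md dl z ext (k - 1) := by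
  intro fuel
  induction fuel with
  | zero =>
    intro u j k path seen memo _ _ hw hk _
    exact absurd (pvWalk_pos md dl k u j k z hw) (by omega)
  | succ fuel ih =>
    intro u j k path seen memo hInv hj hw hk hSeen
    have hL : 0 < dl.length := by omega
    have hkpos := pvWalk_pos md dl k u j k z hw
    obtain ⟨k0, rfl⟩ : ∃ k0, k = k0 + 1 := ⟨k - 1, by omega⟩
    obtain ⟨v, hs, hcases⟩ := pvWalk_succ_elim md dl k0 u j (k0 + 1) z hw
    obtain ⟨hlk, hlen3⟩ := pvStep?_elim md dl u j v hs
    rw [Nat.mod_eq_of_lt hj] at hlk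
    have hj' : PySem.Int.mod ((j : Int) + 1) ((dl.length : Nat) : Int)
        = (((j + 1) % dl.length : Nat) : Int) := by
      rw [show ((j : Int) + 1) = (((j + 1 : Nat)) : Int) by push_cast; ring,
        PySem.Int.mod_natCast]
    have hJ1 : (j + 1) % dl.length < dl.length := Nat.mod_lt _ hL
    rcases hcases with ⟨hz, hk1, hzv⟩ | ⟨hz, _, hw'⟩
    · -- next node is a Z node: Python breaks with steps = 0
      have hzt : pvIsZ v = true := by rw [pvIsZ_eq v hlen3, hz]; simp
      refine ⟨[], ?_, by simp, trivial⟩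
      simp only [pvBLoop, PySem.List.pyGetD_natCast, hlk, hzt, if_true]
      have hk0 : k0 = 0 := by omega
      subst hk0
      rw [← hzv]
      simp
    · -- next node is not a Z node
      have hzb : pvIsZ v = false := by
        rw [pvIsZ_eq v hlen3]; simp only [decide_eq_false_iff_not]; exact hz
      have hwnext : pvWalk md dl k0 v (j + 1) = some (k0, z) := by simpa using hw'
      have hwJ : pvWalk md dl k0 v ((j + 1) % dl.length) = some (k0, z) := by
        rw [← pvWalk_congr_mod md dl k0 v (j + 1) ((j + 1) % dl.length) (by rw [Nat.mod_mod])]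
        exact hwnext
      cases hm : memo.get? (v, (((j + 1) % dl.length : Nat) : Int)) with
      | some r =>
        -- memo hit: the cached value is the true answer by the invariant
        obtain ⟨j2, k2, hj2, _, hk2, hw2⟩ := hInv v _ r.1 r.2 (by rw [hm])
        have hj2e : j2 = (j + 1) % dl.length := by exact_mod_cast hj2.symm
        subst hj2e
        obtain ⟨hke, hze⟩ := pvWalk_unique md dl k2 k0 v ((j + 1) % dl.length) k2 k0 r.2 z hw2 hwJ
        refine ⟨[], ?_, by simp, trivial⟩
        simp only [pvBLoop, PySem.List.pyGetD_natCast, hlk, hzb, Bool.false_eq_true, if_false,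
          hj', hm]
        simp [hk2, hke, hze]
      | none =>
        -- not cached: check the cycle guard, then continue along the path
        have hc : PySem.Set.contains seen (v, (((j + 1) % dl.length : Nat) : Int)) = false := by
          by_contra hcc
          have hmem : (v, (((j + 1) % dl.length : Nat) : Int)) ∈ seen := by
            rw [← PySem.Set.contains_iff]
            cases hb : PySem.Set.contains seen (v, (((j + 1) % dl.length : Nat) : Int))
            · exact absurd hb hcc
            · rfl
          obtain ⟨jv, kv, hjv, hwv, hkkv⟩ := hSeen v _ hmem
          have hjve : jv = (j + 1) % dl.length := by exact_mod_cast hjv.symm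
          subst hjve
          obtain ⟨hke, _⟩ := pvWalk_unique md dl kv k0 v ((j + 1) % dl.length) kv k0 z z hwv hwJ
          omega
        have hSeen' : ∀ (v0 : String) (jI : Int),
            (v0, jI) ∈ PySem.Set.add seen (v, (((j + 1) % dl.length : Nat) : Int)) →
            ∃ (jv kv : Nat), jI = (jv : Int) ∧ pvWalk md dl kv v0 jv = some (kv, z) ∧ k0 ≤ kv := by
          intro v0 jI hmem
          rw [PySem.Set.mem_add] at hmem
          rcases hmem with hold | hnew
          · obtain ⟨jv, kv, h1, h2, h3⟩ := hSeen v0 jI hold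
            exact ⟨jv, kv, h1, h2, by omega⟩
          · have he1 : v0 = v := congrArg Prod.fst hnew
            have he2 : jI = (((j + 1) % dl.length : Nat) : Int) := congrArg Prod.snd hnew
            subst he1
            exact ⟨(j + 1) % dl.length, k0, he2, hwJ, le_refl _⟩
        obtain ⟨ext', heq', hlen', hchain'⟩ := ih v ((j + 1) % dl.length) k0
          (path ++ [(v, (((j + 1) % dl.length : Nat) : Int))])
          (PySem.Set.add seen (v, (((j + 1) % dl.length : Nat) : Int))) memo
          hInv hJ1 hwJ (by omega) hSeen'
        refine ⟨(v, (((j + 1) % dl.length : Nat) : Int)) :: ext', ?_, by simp; omega, ?_⟩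
        · simp only [pvBLoop, PySem.List.pyGetD_natCast, hlk, hzb, Bool.false_eq_true, if_false,
            hj', hm, hc]
          rw [heq']
          simp only [Prod.mk.injEq]
          refine ⟨by simp only [List.length_cons]; omega, trivial, by simp⟩
        · show pvChain md dl z _ k0
          exact ⟨⟨(j + 1) % dl.length, rfl, hJ1, hwJ⟩, hchain'⟩


lemma pvBackfill (md : PySem.Dict String (PySem.Dict String String)) (dl : List Char)
    (z : String) :
    ∀ (lst : List (String × Int)) (m : Nat) (memo : PySem.Dict (String × Int) (Int × String)),
      pvChain md dl z lst m → lst.length ≤ m → pvInv md dl memo →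
      ∃ memo',
        lst.reverse.foldl (fun (acc : Int × PySem.Dict (String × Int) (Int × String)) s =>
            (acc.1 + 1, acc.2.insert s (acc.1 + 1, z))) (((m - lst.length : Nat) : Int), memo)
          = (((m : Nat) : Int), memo')
        ∧ pvInv md dl memo'
        ∧ (∀ (a : String × Int) (t : List (String × Int)), lst = a :: t →
            memo'.get? a = some (((m : Nat) : Int), z)) := by
  intro lst
  induction lst with
  | nil =>
    intro m memo _ _ hInv
    refine ⟨memo, by simp, hInv, by intro a t h; exact absurd h (by simp)⟩
  | cons a t ih =>
    intro m memo hchain hlen hInv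
    obtain ⟨va, jIa⟩ := a
    obtain ⟨⟨jv, hjI, hjvlt, hwv⟩, hchaint⟩ := hchain
    have hm1 : 1 ≤ m := by
      simp only [List.length_cons] at hlen; omega
    obtain ⟨memo'', hfold, hInv'', _⟩ := ih (m - 1) memo hchaint
      (by simp only [List.length_cons] at hlen; omega) hInv
    have hinit : ((m - (((va, jIa)) :: t).length : Nat) : Int) = ((m - 1 - t.length : Nat) : Int) := by
      simp only [List.length_cons]; omega
    have hstep : ((m - 1 : Nat) : Int) + 1 = ((m : Nat) : Int) := by omega
    refine ⟨memo''.insert (va, jIa) (((m : Nat) : Int), z), ?_, ?_, ?_⟩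
    · rw [List.reverse_cons, List.foldl_append, hinit, hfold]
      simp only [List.foldl_cons, List.foldl_nil, hstep]
    · intro u jI kI zz hget
      rw [PySem.Dict.get?_insert] at hget
      by_cases hcase : (u, jI) = (va, jIa)
      · rw [if_pos hcase] at hget
        have hu : u = va := congrArg Prod.fst hcase
        have hj : jI = jIa := congrArg Prod.snd hcase
        injection hget with hget
        have hkI : kI = ((m : Nat) : Int) := (congrArg Prod.fst hget).symm
        have hzz : zz = z := (congrArg Prod.snd hget).symm
        subst hu; subst hj; subst hkI; subst hzz
        exact ⟨jv, m, hjI, hjvlt, rfl, hwv⟩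
      · rw [if_neg hcase] at hget
        exact hInv'' u jI kI zz hget
    · intro a' t' heq
      have ha : a' = (va, jIa) := by
        have := congrArg (fun l => l.head?) heq
        simpa using this.symm
      rw [ha, PySem.Dict.get?_insert_self]


lemma pvSolve_eq (md : PySem.Dict String (PySem.Dict String String)) (dl : List Char)
    (u : String) (j k : Nat) (z : String)
    (memo : PySem.Dict (String × Int) (Int × String))
    (hInv : pvInv md dl memo) (hj : j < dl.length)
    (hw : pvWalk md dl k u j = some (k, z)) (hcap : k ≤ 100000000) :
    ∃ memo', pvSolve md dl (dl.length : Int) memo u (j : Int) = (memo', (((k : Nat) : Int), z))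
      ∧ pvInv md dl memo' := by
  cases hm : memo.get? (u, (j : Int)) with
  | some r =>
    obtain ⟨j2, k2, hj2, _, hk2, hw2⟩ := hInv u (j : Int) r.1 r.2 (by rw [hm])
    have hj2e : j2 = j := by exact_mod_cast hj2.symm
    rw [hj2e] at hw2
    obtain ⟨hke, hze⟩ := pvWalk_unique md dl k2 k u j k2 k r.2 z hw2 hw
    refine ⟨memo, ?_, hInv⟩
    simp only [pvSolve, hm]
    rw [show r = (((k : Nat) : Int), z) by
      rw [← hze, ← hke, ← hk2]]
  | none =>
    have hSeen : ∀ (v : String) (jI : Int),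
        (v, jI) ∈ PySem.Set.add PySem.Set.empty (u, (j : Int)) →
        ∃ (jv kv : Nat), jI = (jv : Int) ∧ pvWalk md dl kv v jv = some (kv, z) ∧ k ≤ kv := by
      intro v jI hmem
      rw [PySem.Set.mem_add] at hmem
      rcases hmem with habs | hnew
      · exact absurd habs (by simp [PySem.Set.empty])
      · have he1 : v = u := congrArg Prod.fst hnew
        have he2 : jI = (j : Int) := congrArg Prod.snd hnew
        subst he1
        exact ⟨j, k, he2, hw, le_refl _⟩
    obtain ⟨ext, hloop, hlenext, hchain⟩ := pvBLoop_eq md dl z 100000001 u j k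
      [(u, (j : Int))] (PySem.Set.add PySem.Set.empty (u, (j : Int))) memo
      hInv hj hw (by omega) hSeen
    have hchainfull : pvChain md dl z ((u, (j : Int)) :: ext) k := ⟨⟨j, rfl, hj, hw⟩, hchain⟩
    obtain ⟨memo', hfold, hInv', hget⟩ := pvBackfill md dl z ((u, (j : Int)) :: ext) k memo
      hchainfull (by simp only [List.length_cons]; omega) hInv
    refine ⟨memo', ?_, hInv'⟩
    simp only [pvSolve, hm, hloop]
    rw [show ((k - 1 - ext.length : Nat) : Int)
        = ((k - ((u, (j : Int)) :: ext).length : Nat) : Int) by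
      simp only [List.length_cons]; omega]
    simp only [List.singleton_append]
    rw [hfold]
    simp only
    rw [PySem.Dict.getD_eq_get?_getD, hget (u, (j : Int)) ext rfl]
    rfl

-- ---------- B side: assembling the output ----------

-- the answer value both programs produce for Z-node zn at offset iN
def pvAnsF (mapdict : List (String × List (String × String))) (dirs : String)
    (zn : String) (iN : Nat) : Int × String :=
  match pvWalk (pvConv mapdict) dirs.toList 100000000 zn iN with
  | some res => (((res.1 : Nat) : Int), res.2)
  | none => (0, zn)

lemma pvAnsF_eq (mapdict : List (String × List (String × String))) (dirs : String)
    (zn : String) (iN k : Nat) (zv : String)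
    (hw : pvWalk (pvConv mapdict) dirs.toList k zn iN = some (k, zv))
    (hk : k ≤ 100000000) : pvAnsF mapdict dirs zn iN = (((k : Nat) : Int), zv) := by
  unfold pvAnsF
  rw [pvWalk_mono (pvConv mapdict) dirs.toList k 100000000 hk zn iN k zv hw]

-- a fold that appends one keyed result per element while threading a stateful accumulator
lemma pvFoldl_pairs {α β γ : Type} (P : α → Prop)
    (step : α × List (β × γ) → β → α × List (β × γ)) (g : β → γ) :
    ∀ (zs : List β),
      (∀ z ∈ zs, ∀ (a : α) (l : List (β × γ)), P a →
        ∃ a', step (a, l) z = (a', l ++ [(z, g z)]) ∧ P a') →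
      ∀ (a : α) (l : List (β × γ)), P a →
        ∃ a', zs.foldl step (a, l) = (a', l ++ zs.map (fun z => (z, g z))) ∧ P a' := by
  intro zs
  induction zs with
  | nil => intro _ a l hP; exact ⟨a, by simp, hP⟩
  | cons zz rest ih =>
    intro hstep a l hP
    obtain ⟨a1, h1, hP1⟩ := hstep zz (by simp) a l hP
    obtain ⟨a', h2, hP'⟩ := ih (fun z hz => hstep z (by simp [hz])) a1 (l ++ [(zz, g zz)]) hP1
    refine ⟨a', ?_, hP'⟩
    rw [List.foldl_cons, h1, h2]
    simp

lemma pvB_canonical (mapdict : List (String × List (String × String))) (dirs : String)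
    (H : ∀ zn ∈ (pvConv mapdict).keys.filter (fun x => pvIsZ x), ∀ iN : Nat,
      iN < dirs.toList.length →
      ∃ (k : Nat) (zv : String), pvWalk (pvConv mapdict) dirs.toList k zn iN = some (k, zv)
        ∧ k ≤ 100000000) :
    find_z_to_z_steps_alt mapdict dirs
      = ((pvConv mapdict).keys.filter (fun x => pvIsZ x)).map
          (fun zn => (zn, (PySem.List.pyRange 0 ((dirs.toList.length : Nat) : Int) 1).map
            (fun i => (i, pvAnsF mapdict dirs zn i.toNat)))) := by
  simp only [find_z_to_z_steps_alt, PySem.Str.len_eq]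
  have hstepInner : ∀ z ∈ (pvConv mapdict).keys.filter (fun x => pvIsZ x),
      ∀ i ∈ PySem.List.pyRange 0 ((dirs.toList.length : Nat) : Int) 1,
      ∀ (a : PySem.Dict (String × Int) (Int × String)) (l : List (Int × Int × String)),
      pvInv (pvConv mapdict) dirs.toList a →
      ∃ a',
        ((fun (a : PySem.Dict (String × Int) (Int × String) × List (Int × Int × String)) i =>
          ((pvSolve (pvConv mapdict) dirs.toList ((dirs.toList.length : Nat) : Int) a.1 z i).1,
            a.2 ++ [(i, (pvSolve (pvConv mapdict) dirs.toList ((dirs.toList.length : Nat) : Int) a.1 z i).2)]))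
          (a, l) i)
          = (a', l ++ [(i, pvAnsF mapdict dirs z i.toNat)])
        ∧ pvInv (pvConv mapdict) dirs.toList a' := by
    intro z hz i hi a l hP
    rw [PySem.List.mem_pyRange_one] at hi
    have hieq : i = ((i.toNat : Nat) : Int) := (Int.toNat_of_nonneg hi.1).symm
    have hiN : i.toNat < dirs.toList.length := by omega
    obtain ⟨k, zv, hw, hk⟩ := H z hz i.toNat hiN
    obtain ⟨a', heq, hP'⟩ := pvSolve_eq (pvConv mapdict) dirs.toList z i.toNat k zv a hP hiN hw hk
    refine ⟨a', ?_, hP'⟩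
    rw [hieq]
    simp only [heq, Int.toNat_natCast]
    rw [pvAnsF_eq mapdict dirs z i.toNat k zv hw hk]
  have hmain := pvFoldl_pairs (pvInv (pvConv mapdict) dirs.toList)
    (fun acc z =>
      ((List.foldl
          (fun (a : PySem.Dict (String × Int) (Int × String) × List (Int × Int × String)) i =>
            ((pvSolve (pvConv mapdict) dirs.toList ((dirs.toList.length : Nat) : Int) a.1 z i).1,
              a.2 ++ [(i, (pvSolve (pvConv mapdict) dirs.toList ((dirs.toList.length : Nat) : Int) a.1 z i).2)]))
          (acc.1, ([] : List (Int × Int × String)))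
          (PySem.List.pyRange 0 ((dirs.toList.length : Nat) : Int) 1)).1,
        acc.2 ++
          [(z,
            (List.foldl
                (fun (a : PySem.Dict (String × Int) (Int × String) × List (Int × Int × String)) i =>
                  ((pvSolve (pvConv mapdict) dirs.toList ((dirs.toList.length : Nat) : Int) a.1 z i).1,
                    a.2 ++ [(i, (pvSolve (pvConv mapdict) dirs.toList ((dirs.toList.length : Nat) : Int) a.1 z i).2)]))
                (acc.1, ([] : List (Int × Int × String)))
                (PySem.List.pyRange 0 ((dirs.toList.length : Nat) : Int) 1)).2)]))
    (fun zn => (PySem.List.pyRange 0 ((dirs.toList.length : Nat) : Int) 1).map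
      (fun i => (i, pvAnsF mapdict dirs zn i.toNat)))
    ((pvConv mapdict).keys.filter (fun x => pvIsZ x))
    (by
      intro z hz m l hP
      obtain ⟨m', hinner, hP'⟩ := pvFoldl_pairs (pvInv (pvConv mapdict) dirs.toList)
        (fun (a : PySem.Dict (String × Int) (Int × String) × List (Int × Int × String)) i =>
          ((pvSolve (pvConv mapdict) dirs.toList ((dirs.toList.length : Nat) : Int) a.1 z i).1,
            a.2 ++ [(i, (pvSolve (pvConv mapdict) dirs.toList ((dirs.toList.length : Nat) : Int) a.1 z i).2)]))
        (fun i => pvAnsF mapdict dirs z i.toNat)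
        (PySem.List.pyRange 0 ((dirs.toList.length : Nat) : Int) 1)
        (hstepInner z hz) m [] hP
      refine ⟨m', ?_, hP'⟩
      simp only [hinner]
      simp)
    PySem.Dict.empty [] (pvInv_empty (pvConv mapdict) dirs.toList)
  obtain ⟨a', hfold, _⟩ := hmain
  rw [hfold]
  simp

-- ---------- the keys of the converted dict ----------

lemma pvKeys_conv (mapdict : List (String × List (String × String))) :
    (pvConv mapdict).keys = PySem.Set.ofList (mapdict.map (fun p => p.1)) := by
  have hconv : pvConv mapdict
      = List.foldl (fun acc p => acc.insert p.1 p.2) PySem.Dict.empty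
          (mapdict.map (fun p => (p.1, PySem.Dict.ofList p.2))) := rfl
  rw [hconv,
    PySem.Dict.keys_foldl_insert_key (mapdict.map (fun p => (p.1, PySem.Dict.ofList p.2)))
      (fun p => p.1) (fun _ p => p.2) PySem.Dict.empty,
    PySem.Dict.keys_empty, PySem.Set.update_nil_left, List.map_map]
  rfl

-- ===== VERDICT (by name: the statement is the Claim_ definition above) =====
theorem find_z_to_z_steps_spec : Claim_equal_find_z_to_z_steps := by
  intro mapdict dirs _ hpre
  unfold Spec_find_z_to_z_steps
  obtain ⟨hlen, hwalks⟩ := hpre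
  have hmemkeys : ∀ zn, zn ∈ (pvConv mapdict).keys → ∃ p ∈ mapdict, p.1 = zn := by
    intro zn hzn
    rw [pvKeys_conv mapdict, PySem.Set.mem_ofList] at hzn
    obtain ⟨p, hp, hpe⟩ := List.mem_map.mp hzn
    exact ⟨p, hp, hpe⟩
  have H : ∀ zn ∈ (pvConv mapdict).keys.filter (fun x => pvIsZ x), ∀ iN : Nat,
      iN < dirs.toList.length →
      ∃ (k : Nat) (zv : String), pvWalk (pvConv mapdict) dirs.toList k zn iN = some (k, zv)
        ∧ k ≤ 100000000 := by
    intro zn hzn iN hiN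
    have hmf := List.mem_filter.mp hzn
    obtain ⟨p, hp, hpe⟩ := hmemkeys zn hmf.1
    have hplen : 3 ≤ p.1.toList.length := hlen p hp
    have hgz : p.1.toList.getD 2 ' ' = 'Z' := by
      have hisz := hmf.2
      rw [← hpe, pvIsZ_eq p.1 hplen] at hisz
      exact of_decide_eq_true hisz
    have hS := hwalks p hp hgz iN hiN
    rw [hpe] at hS
    obtain ⟨res, hres⟩ := Option.isSome_iff_exists.mp hS
    obtain ⟨k, zv⟩ := res
    have hle := pvWalk_le (pvConv mapdict) dirs.toList _ zn iN k zv hres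
    have hFle : min (mapdict.length * dirs.toList.length) 100000000 ≤ 100000000 :=
      Nat.min_le_right _ _
    exact ⟨k, zv, pvWalk_exact (pvConv mapdict) dirs.toList _ zn iN k zv hres, by omega⟩
  rw [pvA_canonical mapdict dirs, pvB_canonical mapdict dirs H]
  simp only [PySem.Str.len_eq]
  apply List.map_congr_left
  intro zn hzn
  refine congrArg (fun y => (zn, y)) ?_
  apply List.map_congr_left
  intro i hi
  rw [PySem.List.mem_pyRange_one] at hi
  have hieq : i = ((i.toNat : Nat) : Int) := (Int.toNat_of_nonneg hi.1).symm
  have hiN : i.toNat < dirs.toList.length := by omega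
  obtain ⟨k, zv, hw, hk⟩ := H zn hzn i.toNat hiN
  refine congrArg (fun y => (i, y)) ?_
  rw [pvAnsF_eq mapdict dirs zn i.toNat k zv hw hk, hieq]
  exact pvFollow_eq (pvConv mapdict) dirs zn i.toNat hiN k zv hw hk
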